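-- pv_equiv track=rewrite | github.com/dave-s477/SoMeNLP | somenlp/NER/tuning_wrapper_lstm.py | get_abbr
-- ===== SOURCE A (Python) =====
-- def get_abbr(s):
--     abbr = s[0]
--     prev_char = s[0]
--     for c in s[1:]:
--         if prev_char == '_':
--             abbr += c
--         prev_char = c
--     return abbr
-- ===== SOURCE B (Python) =====
-- import re
--
-- def get_abbr(s):
--     return s[0] + ''.join(re.findall(r'(?<=_).', s, re.S))
-- ===== Notes on version B (the rewrite author's own statement) =====
-- stated objective: idiomatic
-- what changed: Replaces the manual prev_char loop with a single zero-width lookbehind regex collecting every character that follows an underscore, concatenated after the first character.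
import Mathlib
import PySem

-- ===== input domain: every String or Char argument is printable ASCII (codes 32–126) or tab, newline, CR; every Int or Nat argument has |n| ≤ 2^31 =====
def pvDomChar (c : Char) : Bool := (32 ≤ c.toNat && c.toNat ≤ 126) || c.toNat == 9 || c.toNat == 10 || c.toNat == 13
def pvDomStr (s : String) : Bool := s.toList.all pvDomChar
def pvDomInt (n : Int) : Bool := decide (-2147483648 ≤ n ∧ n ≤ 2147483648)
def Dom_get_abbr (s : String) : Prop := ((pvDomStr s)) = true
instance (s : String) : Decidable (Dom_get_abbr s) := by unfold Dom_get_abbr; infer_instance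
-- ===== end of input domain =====

-- B: first char plus every char following an underscore, via one overlapping lookbehind regex (idiomatic; same cost).
-- Both A and B raise IndexError on the empty string (s[0]); Pre_ excludes exactly that input.

-- ===== PORT A =====
-- literal port: abbr = s[0]; prev = s[0]; for c in s[1:]: if prev == '_': abbr += c; prev = c
def get_abbr (s : String) : String :=
  match s.toList with
  | [] => ""  -- s[0] raises IndexError; excluded by Pre_get_abbr
  | c0 :: rest =>
    let st := rest.foldl (fun (st : List Char × Char) c =>
      (if st.2 = '_' then st.1 ++ [c] else st.1, c)) ([c0], c0)
    String.mk st.1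

-- ===== PORT B =====
-- re.findall(r'(?<=_).', s, re.S) = the characters at positions i+1 with s[i] = '_', in order;
-- ported exactly as the zip-filter over adjacent pairs.
def get_abbr_alt (s : String) : String :=
  match s.toList with
  | [] => ""  -- s[0] raises IndexError; excluded by Pre_get_abbr
  | c0 :: rest =>
    String.mk (c0 :: ((s.toList.zip rest).filter (fun p => p.1 = '_')).map Prod.snd)

-- ===== PRECONDITION & SPEC =====
-- Pre_ excludes the empty string, on which both A and B raise IndexError at s[0].
def Pre_get_abbr (s : String) : Prop := s ≠ ""
instance (s : String) : Decidable (Pre_get_abbr s) := by unfold Pre_get_abbr; infer_instance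
def pvWitness_get_abbr : String := "ab_c__d"
def Spec_get_abbr (s : String) (out : String) : Prop := out = get_abbr_alt s
instance (s : String) (out : String) : Decidable (Spec_get_abbr s out) := by unfold Spec_get_abbr; infer_instance

-- ===== CLAIM (what is proved, stated in full; the proofs are below) =====
def Claim_equal_get_abbr : Prop := ∀ (s : String), Dom_get_abbr s → Pre_get_abbr s → Spec_get_abbr s (get_abbr s)

-- ===== LEMMAS AND PROOFS =====
theorem get_abbr_loop (l : List Char) : ∀ (prev : Char) (acc : List Char),
    (l.foldl (fun (st : List Char × Char) c =>
      (if st.2 = '_' then st.1 ++ [c] else st.1, c)) (acc, prev)).1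
    = acc ++ (((prev :: l).zip l).filter (fun p => p.1 = '_')).map Prod.snd := by
  induction l with
  | nil => intro prev acc; simp
  | cons c t ih =>
    intro prev acc
    simp only [List.foldl, List.zip_cons_cons, List.filter]
    by_cases h : prev = '_'
    · simp [h, ih c (acc ++ [c])]
    · simp [h, ih c acc]

-- ===== VERDICT (by name: the statement is the Claim_ definition above) =====
theorem get_abbr_spec : Claim_equal_get_abbr := by
  intro s _ _
  unfold Spec_get_abbr get_abbr get_abbr_alt
  cases h : s.toList with
  | nil => rfl
  | cons c0 rest => simp [get_abbr_loop rest c0 [c0]]
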